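-- pv_equiv track=rewrite | github.com/farizikhwantri/assuregraph | src/graph_cls_explain.py | sample_errors_first_docs
-- ===== SOURCE A (Python) =====
-- def sample_errors_first_docs(metrics, budget):
--     errors = [m for m in metrics if not m["correct"]]
--     corrects = [m for m in metrics if m["correct"]]
--     selected = [m["doc_idx"] for m in errors[:budget]]
--     remaining = budget - len(selected)
--     if remaining > 0 and len(corrects) > 0:
--         corrects_sorted = sorted(corrects, key=lambda m: -m["margin"])
--         selected.extend([m["doc_idx"] for m in corrects_sorted[:remaining]])
--     return selected
-- ===== SOURCE B (Python) =====
-- def sample_errors_first_docs(metrics, budget):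
--     # One stable sort of the whole list: errors first (constant key keeps their
--     # original order), then correct docs by descending margin; take the first
--     # max(budget, 0) docs (a non-positive budget selects nothing).
--     # Absent "margin"/"doc_idx" fields are read as 0 instead of failing on docs
--     # the budget never selects.
--     order = sorted(metrics, key=lambda m: (1, -m.get("margin", 0)) if m["correct"] else (0, 0))
--     return [m.get("doc_idx", 0) for m in order[:max(budget, 0)]]
-- ===== Notes on version B (the rewrite author's own statement) =====
-- stated objective: simpler
-- what changed: Replaces A's two-comprehension partition plus conditional corrects-only sort and remaining-budget bookkeeping with one stable whole-list sort under a composite key (errors first in original order, then corrects by descending margin) followed by a single slice of the first max(budget,0) docs.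
-- intended difference: For budget < 0 with more error docs than |budget|, A returns a nonempty prefix of the error list (errors[:budget], an artefact of Python's negative-slice semantics), while B returns []; a non-positive budget means no documents may be selected, so [] is the intended value. — e.g. on sample_errors_first_docs([[("correct", 0), ("doc_idx", 3)], [("correct", 0), ("doc_idx", 5)]], -1): A returns [3], B returns []
import Mathlib
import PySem

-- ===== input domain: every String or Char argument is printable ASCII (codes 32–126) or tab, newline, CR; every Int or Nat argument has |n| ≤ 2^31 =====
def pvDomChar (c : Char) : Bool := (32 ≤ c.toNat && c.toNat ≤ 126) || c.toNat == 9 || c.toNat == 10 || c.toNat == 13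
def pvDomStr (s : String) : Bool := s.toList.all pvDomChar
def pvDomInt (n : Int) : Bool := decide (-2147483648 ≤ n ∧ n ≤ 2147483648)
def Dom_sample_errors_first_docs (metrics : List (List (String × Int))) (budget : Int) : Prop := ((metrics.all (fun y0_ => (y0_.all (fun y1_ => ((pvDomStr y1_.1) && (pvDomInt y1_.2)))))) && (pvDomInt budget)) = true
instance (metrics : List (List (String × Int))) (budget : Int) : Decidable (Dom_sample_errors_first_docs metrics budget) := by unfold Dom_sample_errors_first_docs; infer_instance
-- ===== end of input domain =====

-- B replaces A's partition + conditional corrects-only sort + remaining-budget bookkeeping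
-- with one stable whole-list sort under a composite key and a single slice (objective: simpler).

-- Key lookup for these string-keyed dicts. For port A the .getD 0 default is never
-- reached under Pre_sample_errors_first_docs (a missing key there is Python's KeyError);
-- for port B it is exactly B's m.get(k, 0).
def pvGet (m : List (String × Int)) (k : String) : Int :=
  ((PySem.Dict.ofList m).get? k).getD 0

-- Python truthiness of m["correct"] (an int: truthy iff nonzero)
def pvTruthy (m : List (String × Int)) : Bool := !(pvGet m "correct" == 0)

-- ===== PORT A =====
def sample_errors_first_docs (metrics : List (List (String × Int))) (budget : Int) : List Int :=
  let errors := metrics.filter (fun m => !(pvTruthy m))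
  let corrects := metrics.filter (fun m => pvTruthy m)
  let selected := (PySem.List.slice errors none (some budget)).map (fun m => pvGet m "doc_idx")
  let remaining := budget - (selected.length : Int)
  if remaining > 0 ∧ 0 < corrects.length then
    let corrects_sorted := PySem.List.sorted corrects (fun m => -(pvGet m "margin")) false
    selected ++ (PySem.List.slice corrects_sorted none (some remaining)).map (fun m => pvGet m "doc_idx")
  else selected

-- ===== PORT B =====
def sample_errors_first_docs_alt (metrics : List (List (String × Int))) (budget : Int) : List Int :=
  let order := PySem.List.sorted2 metrics
    (fun m => if pvTruthy m then (1 : Int) else 0)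
    (fun m => if pvTruthy m then -(pvGet m "margin") else 0) false
  PySem.List.slice (order.map (fun m => pvGet m "doc_idx")) none (some (max budget 0))

-- ===== PRECONDITION & SPEC =====
-- Pre_ is exactly the key-existence A needs: "correct" on every dict, "doc_idx" on the sliced
-- error dicts, and (only when budget is left over) "margin" plus "doc_idx" on the correct dicts
-- (A reads doc_idx only on the top-remaining corrects, so Pre_ narrows slightly there: on such
-- excluded inputs A still returns, and B's 0-defaults make it return the same selection).
def Pre_sample_errors_first_docs (metrics : List (List (String × Int))) (budget : Int) : Prop :=
  (∀ m ∈ metrics, ((PySem.Dict.ofList m).get? "correct").isSome = true) ∧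
  (∀ m ∈ PySem.List.slice
      (metrics.filter (fun m => (((PySem.Dict.ofList m).get? "correct").getD 0) == 0)) none (some budget),
    ((PySem.Dict.ofList m).get? "doc_idx").isSome = true) ∧
  (∀ m ∈ metrics.filter (fun m => !((((PySem.Dict.ofList m).get? "correct").getD 0) == 0)),
    budget - ((PySem.List.slice
        (metrics.filter (fun m => (((PySem.Dict.ofList m).get? "correct").getD 0) == 0)) none (some budget)).length : Int) > 0 →
    ((PySem.Dict.ofList m).get? "margin").isSome = true ∧
      ((PySem.Dict.ofList m).get? "doc_idx").isSome = true)
instance (metrics : List (List (String × Int))) (budget : Int) : Decidable (Pre_sample_errors_first_docs metrics budget) := by unfold Pre_sample_errors_first_docs; infer_instance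

def pvWitness_sample_errors_first_docs : (List (List (String × Int))) × Int :=
  ([[("correct", 1), ("doc_idx", 0), ("margin", 0)]], 1)

-- For budget < 0 with more error docs than |budget|, A returns a nonempty prefix of the error
-- list (errors[:budget], a tail-truncated slice artefact of Python's negative-slice semantics),
-- while B returns []; a non-positive budget means no documents may be selected, so [] is intended.
def D_sample_errors_first_docs (metrics : List (List (String × Int))) (budget : Int) : Prop :=
  budget < 0 ∧
    0 < ((metrics.filter (fun m => (((PySem.Dict.ofList m).get? "correct").getD 0) == 0)).length : Int) + budget
instance (metrics : List (List (String × Int))) (budget : Int) : Decidable (D_sample_errors_first_docs metrics budget) := by unfold D_sample_errors_first_docs; infer_instance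

def Spec_sample_errors_first_docs (metrics : List (List (String × Int))) (budget : Int) (out : List Int) : Prop := ¬ D_sample_errors_first_docs metrics budget → out = sample_errors_first_docs_alt metrics budget
instance (metrics : List (List (String × Int))) (budget : Int) (out : List Int) : Decidable (Spec_sample_errors_first_docs metrics budget out) := by unfold Spec_sample_errors_first_docs; infer_instance

def pvDiffWitness_sample_errors_first_docs : (List (List (String × Int))) × Int :=
  ([[("correct", 0), ("doc_idx", 3)], [("correct", 0), ("doc_idx", 5)]], -1)
def pvDiffWitnessOut_sample_errors_first_docs : (List Int) × (List Int) := ([3], [])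

-- ===== CLAIM (what is proved, stated in full; the proofs are below) =====
def Claim_unchanged_sample_errors_first_docs : Prop := ∀ (metrics : List (List (String × Int))) (budget : Int), Dom_sample_errors_first_docs metrics budget → Pre_sample_errors_first_docs metrics budget → Spec_sample_errors_first_docs metrics budget (sample_errors_first_docs metrics budget)
def Claim_changed_sample_errors_first_docs : Prop := Dom_sample_errors_first_docs (pvDiffWitness_sample_errors_first_docs.1) (pvDiffWitness_sample_errors_first_docs.2) ∧ Pre_sample_errors_first_docs (pvDiffWitness_sample_errors_first_docs.1) (pvDiffWitness_sample_errors_first_docs.2) ∧ D_sample_errors_first_docs (pvDiffWitness_sample_errors_first_docs.1) (pvDiffWitness_sample_errors_first_docs.2) ∧ sample_errors_first_docs (pvDiffWitness_sample_errors_first_docs.1) (pvDiffWitness_sample_errors_first_docs.2) = pvDiffWitnessOut_sample_errors_first_docs.1 ∧ sample_errors_first_docs_alt (pvDiffWitness_sample_errors_first_docs.1) (pvDiffWitness_sample_errors_first_docs.2) = pvDiffWitnessOut_sample_errors_first_docs.2 ∧ pvDiffWitnessOut_sample_errors_first_docs.1 ≠ pvDiffWitnessOut_sample_errors_first_docs.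2
def Claim_exact_sample_errors_first_docs : Prop := ∀ (metrics : List (List (String × Int))) (budget : Int), Dom_sample_errors_first_docs metrics budget → Pre_sample_errors_first_docs metrics budget → D_sample_errors_first_docs metrics budget → sample_errors_first_docs metrics budget ≠ sample_errors_first_docs_alt metrics budget

-- ===== LEMMAS AND PROOFS =====

lemma pvInsertBy_cons {α : Type} (before : α → α → Bool) (x y : α) (ys : List α) :
    PySem.List.insertBy before x (y :: ys) =
      if before x y then x :: y :: ys else y :: PySem.List.insertBy before x ys := rfl

lemma pvInsertBy_append {α : Type} (before : α → α → Bool) (x : α) (E C : List α)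
    (h : ∀ e ∈ E, before x e = false) :
    PySem.List.insertBy before x (E ++ C) = E ++ PySem.List.insertBy before x C := by
  induction E with
  | nil => simp
  | cons e E ih =>
    simp only [List.cons_append, pvInsertBy_cons, h e (by simp)]
    simp only [Bool.false_eq_true, if_false]
    rw [ih (fun e he => h e (by simp [he]))]

lemma pvInsertBy_front {α : Type} (before : α → α → Bool) (x : α) (C : List α)
    (h : ∀ c ∈ C, before x c = true) :
    PySem.List.insertBy before x C = x :: C := by
  cases C with
  | nil => rfl
  | cons c cs => simp [pvInsertBy_cons, h c (by simp)]

lemma pvInsertBy_congr {α : Type} (before before' : α → α → Bool) (x : α) (C : List α)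
    (h : ∀ c ∈ C, before x c = before' x c) :
    PySem.List.insertBy before x C = PySem.List.insertBy before' x C := by
  induction C with
  | nil => rfl
  | cons c cs ih =>
    simp only [pvInsertBy_cons, h c (by simp)]
    rw [ih (fun c hc => h c (by simp [hc]))]

lemma pvSplitFold {α : Type} (flag : α → Bool) (bef2 bef1 : α → α → Bool)
    (hEE : ∀ a b, flag a = false → flag b = false → bef2 a b = false)
    (hEC : ∀ a b, flag a = false → flag b = true → bef2 a b = true)
    (hCE : ∀ a b, flag a = true → flag b = false → bef2 a b = false)
    (hCC : ∀ a b, flag a = true → flag b = true → bef2 a b = bef1 a b) :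
    ∀ (xs E C : List α), (∀ e ∈ E, flag e = false) → (∀ c ∈ C, flag c = true) →
      xs.foldl (fun acc x => PySem.List.insertBy bef2 x acc) (E ++ C)
        = (E ++ xs.filter (fun x => !flag x)) ++
            (xs.filter flag).foldl (fun acc x => PySem.List.insertBy bef1 x acc) C := by
  intro xs
  induction xs with
  | nil => intro E C hE hC; simp
  | cons x xs ih =>
    intro E C hE hC
    simp only [List.foldl_cons, List.filter_cons]
    cases hx : flag x with
    | false =>
      have hstep : PySem.List.insertBy bef2 x (E ++ C) = (E ++ [x]) ++ C := by
        rw [pvInsertBy_append bef2 x E C (fun e he => hEE x e hx (hE e he))]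
        rw [pvInsertBy_front bef2 x C (fun c hc => hEC x c hx (hC c hc))]
        simp
      rw [hstep, ih (E ++ [x]) C
        (by intro e he; rcases List.mem_append.1 he with h | h
            · exact hE e h
            · simp at h; subst h; exact hx) hC]
      simp
    | true =>
      have hstep : PySem.List.insertBy bef2 x (E ++ C) = E ++ PySem.List.insertBy bef1 x C := by
        rw [pvInsertBy_append bef2 x E C (fun e he => hCE x e hx (hE e he))]
        rw [pvInsertBy_congr bef2 bef1 x C (fun c hc => hCC x c hx (hC c hc))]
      rw [hstep, ih E (PySem.List.insertBy bef1 x C) hE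
        (by intro c hc; rcases (PySem.List.mem_insertBy bef1 x c C).1 hc with h | h
            · subst h; exact hx
            · exact hC c h)]
      simp

-- B's sorted2 run splits into A's error partition followed by A's corrects sort.
lemma pvOrderSplit (metrics : List (List (String × Int))) :
    PySem.List.sorted2 metrics
        (fun m => if pvTruthy m then (1 : Int) else 0)
        (fun m => if pvTruthy m then -(pvGet m "margin") else 0) false
      = metrics.filter (fun m => !(pvTruthy m)) ++
          PySem.List.sorted (metrics.filter (fun m => pvTruthy m))
            (fun m => -(pvGet m "margin")) false := by
  rw [show PySem.List.sorted2 metrics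
        (fun m => if pvTruthy m then (1 : Int) else 0)
        (fun m => if pvTruthy m then -(pvGet m "margin") else 0) false
      = metrics.foldl (fun acc x => PySem.List.insertBy
          (fun a b => decide ((if pvTruthy a then (1:Int) else 0) < (if pvTruthy b then (1:Int) else 0)) ||
            (!decide ((if pvTruthy b then (1:Int) else 0) < (if pvTruthy a then (1:Int) else 0)) &&
              decide ((if pvTruthy a then -(pvGet a "margin") else 0) < (if pvTruthy b then -(pvGet b "margin") else 0)))) x acc) [] from rfl]
  rw [PySem.List.sorted_eq_foldl_insertBy]
  have := pvSplitFold (α := List (String × Int)) (fun m => pvTruthy m)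
    (fun a b => decide ((if pvTruthy a then (1:Int) else 0) < (if pvTruthy b then (1:Int) else 0)) ||
      (!decide ((if pvTruthy b then (1:Int) else 0) < (if pvTruthy a then (1:Int) else 0)) &&
        decide ((if pvTruthy a then -(pvGet a "margin") else 0) < (if pvTruthy b then -(pvGet b "margin") else 0))))
    (fun a b => decide (-(pvGet a "margin") < -(pvGet b "margin")))
    (by intro a b ha hb; simp [ha, hb])
    (by intro a b ha hb; simp [ha, hb])
    (by intro a b ha hb; simp [ha, hb])
    (by intro a b ha hb; simp [ha, hb])
    metrics [] [] (by simp) (by simp)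
  simpa using this

lemma pvClampNeg (n : Nat) (b : Int) (hb : b < 0) :
    PySem.List.clampIdx n b = ((n : Int) + b).toNat := by
  unfold PySem.List.clampIdx
  split_ifs <;> omega

lemma pvSliceToNeg {α : Type} (xs : List α) (b : Int) (hb : b < 0) :
    PySem.List.slice xs none (some b) = xs.take ((xs.length : Int) + b).toNat := by
  simp [PySem.List.slice, pvClampNeg _ _ hb]

lemma pvFilterLen {α : Type} (p : α → Bool) (xs : List α) :
    (xs.filter (fun x => !p x)).length + (xs.filter p).length = xs.length := by
  induction xs with
  | nil => rfl
  | cons x xs ih => cases hx : p x <;> simp [hx] <;> omega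

lemma pvTakeAppend {α : Type} (l₁ l₂ : List α) (n : Nat) :
    (l₁ ++ l₂).take n = l₁.take n ++ l₂.take (n - l₁.length) := by
  induction l₁ generalizing n with
  | nil => simp
  | cons a l ih =>
    cases n with
    | zero => simp
    | succ n => simp [ih, Nat.succ_sub_succ]

-- the filter in D_ is A's error filter
lemma pvDFilter (metrics : List (List (String × Int))) :
    metrics.filter (fun m => (((PySem.Dict.ofList m).get? "correct").getD 0) == 0)
      = metrics.filter (fun m => !(pvTruthy m)) := by
  apply List.filter_congr
  intro m _
  simp [pvTruthy, pvGet]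

-- ===== VERDICT (by name: the statement is the Claim_ definition above) =====
theorem sample_errors_first_docs_spec : Claim_unchanged_sample_errors_first_docs := by
  intro metrics budget _ _ hnd
  simp only [sample_errors_first_docs, sample_errors_first_docs_alt]
  rw [pvOrderSplit, List.map_append]
  set E := metrics.filter (fun m => !(pvTruthy m)) with hE
  set C := metrics.filter (fun m => pvTruthy m) with hC
  set S := PySem.List.sorted C (fun m => -(pvGet m "margin")) false with hS
  have hlenES : E.length + C.length = metrics.length := pvFilterLen _ _
  have hlenS : S.length = C.length := by rw [hS]; exact PySem.List.length_sorted ..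
  by_cases h0 : 0 <= budget
  · rw [max_eq_left h0, PySem.List.slice_to E h0, PySem.List.slice_to _ h0]
    by_cases hble : budget.toNat <= E.length
    · rw [if_neg (by simp only [List.length_map, List.length_take]; omega)]
      rw [List.take_append_of_le_length (by simpa using hble), List.map_take]
    · have hEb : E.length < budget.toNat := Nat.lt_of_not_le hble
      rw [List.take_of_length_le (le_of_lt hEb)]
      by_cases hc0 : C.length = 0
      · have hCnil : C = [] := List.eq_nil_of_length_eq_zero hc0
        have hSnil : S = [] := by rw [hS, hCnil]; rfl
        rw [if_neg (by simp [hc0]), hSnil]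
        simp only [List.map_nil, List.append_nil]
        rw [List.take_of_length_le (by simp; omega)]
      · have hrem : budget - ((E.map (fun m => pvGet m "doc_idx")).length : Int) > 0 := by
          simp only [List.length_map]; omega
        rw [if_pos ⟨hrem, by omega⟩]
        rw [PySem.List.slice_to _ (by simp only [List.length_map]; omega)]
        rw [pvTakeAppend]
        have e1 : List.take budget.toNat (List.map (fun m => pvGet m "doc_idx") E)
            = List.map (fun m => pvGet m "doc_idx") E :=
          List.take_of_length_le (by simp only [List.length_map]; omega)
        have e3 : (budget - ((List.map (fun m => pvGet m "doc_idx") E).length : Int)).toNat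
            = budget.toNat - (List.map (fun m => pvGet m "doc_idx") E).length := by
          simp only [List.length_map]; omega
        rw [e1, e3, List.map_take]
  · have hneg : budget < 0 := by omega
    have hEneg : (E.length : Int) + budget ≤ 0 := by
      by_contra hgt
      exact hnd (by unfold D_sample_errors_first_docs; rw [pvDFilter, ← hE]; exact ⟨hneg, by omega⟩)
    rw [max_eq_right (by omega), pvSliceToNeg _ _ hneg,
      PySem.List.slice_to _ (le_refl (0:Int))]
    have h1 : ((E.length : Int) + budget).toNat = 0 := by omega
    rw [h1]
    simp only [List.take_zero, List.map_nil, Int.toNat_zero, List.take_zero]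
    rw [if_neg (by rintro ⟨h1, -⟩; simp at h1; omega)]

theorem sample_errors_first_docs_changed : Claim_changed_sample_errors_first_docs := by
  unfold Claim_changed_sample_errors_first_docs; decide

theorem sample_errors_first_docs_tight : Claim_exact_sample_errors_first_docs := by
  intro metrics budget _ _ hD hEq
  obtain ⟨hneg, hlen⟩ := hD
  rw [pvDFilter] at hlen
  have hAB := congrArg List.length hEq
  revert hAB
  simp only [sample_errors_first_docs, sample_errors_first_docs_alt]
  set E := metrics.filter (fun m => !(pvTruthy m)) with hE
  rw [pvSliceToNeg _ _ hneg, max_eq_right (by omega : budget ≤ 0),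
    PySem.List.slice_to _ (le_refl (0:Int))]
  rw [if_neg (by rintro ⟨h1, -⟩; simp only [List.length_map, List.length_take] at h1; omega)]
  simp only [List.length_map, List.length_take, Int.toNat_zero, List.take_zero, List.length_nil]
  omega
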